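-- pv_equiv track=rewrite | github.com/Miles-Johnson/merchant-ledger | scripts/audit_pricing_gaps.py | _matches_non_consumable_tool_root
-- ===== SOURCE A (Python) =====
-- from typing import Dict, List, Optional, Set, Tuple
--
-- NON_CONSUMABLE_TOOL_ROOTS = (
--     "sewingkit",
--     "sewing",
--     "pickaxe",
--     "shovel",
--     "scythe",
--     "hammer",
--     "chisel",
--     "knife",
--     "axe",
--     "awl",
--     "saw",
--     "sew",
-- )
--
-- def _normalize_tool_match_text(value: Optional[str]) -> str:
--     text = (value or "").strip().lower()
--     if not text:
--         return ""
--
--     if ":" in text: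
--         return text.split(":")[-1]
--
--     return text
--
-- def _matches_non_consumable_tool_root(value: Optional[str]) -> bool:
--     text = _normalize_tool_match_text(value)
--     if not text:
--         return False
--
--     for root in NON_CONSUMABLE_TOOL_ROOTS:
--         if text == root or text.startswith(f"{root}-") or text.startswith(f"{root}_"):
--             return True
--
--     return False
-- ===== SOURCE B (Python) =====
-- NON_CONSUMABLE_TOOL_ROOTS = (
--     "sewingkit",
--     "sewing",
--     "pickaxe",
--     "shovel",
--     "scythe",
--     "hammer",
--     "chisel",
--     "knife",
--     "axe",
--     "awl",
--     "saw",
--     "sew",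
-- )
--
-- _ROOT_SET = frozenset(NON_CONSUMABLE_TOOL_ROOTS)
--
--
-- def _normalize_tool_match_text(value):
--     text = (value or "").strip().lower()
--     if not text:
--         return ""
--
--     if ":" in text:
--         return text.split(":")[-1]
--
--     return text
--
--
-- def _matches_non_consumable_tool_root(value):
--     text = _normalize_tool_match_text(value)
--     if not text:
--         return False
--
--     token_chars = []
--     for ch in text:
--         if ch == "-" or ch == "_":
--             break
--         token_chars.append(ch)
--
--     return "".join(token_chars) in _ROOT_SET
-- ===== Notes on version B (the rewrite author's own statement) =====
-- stated objective: simpler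
-- what changed: The loop over the 12 roots with three prefix/equality checks per root is replaced by computing the token of the normalized text before its first separator (hyphen or underscore) in one pass and testing that single token for membership in a frozenset of the roots.
import Mathlib
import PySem

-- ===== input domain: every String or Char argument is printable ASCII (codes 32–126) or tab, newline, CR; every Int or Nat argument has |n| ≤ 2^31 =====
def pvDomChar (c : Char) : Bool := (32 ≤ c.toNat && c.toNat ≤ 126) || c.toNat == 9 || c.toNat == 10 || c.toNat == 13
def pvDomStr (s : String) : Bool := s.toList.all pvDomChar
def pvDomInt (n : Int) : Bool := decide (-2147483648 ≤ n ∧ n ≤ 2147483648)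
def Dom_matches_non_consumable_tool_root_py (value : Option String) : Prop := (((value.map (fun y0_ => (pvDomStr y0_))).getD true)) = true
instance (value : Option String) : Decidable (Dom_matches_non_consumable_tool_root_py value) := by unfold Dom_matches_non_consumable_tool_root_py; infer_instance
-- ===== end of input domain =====

-- B replaces A's loop over the 12 tool roots (equality + two prefix checks per root) by one
-- pass extracting the token before the first separator and a single set membership; objective: simpler.


-- ===== PORT A =====
-- NON_CONSUMABLE_TOOL_ROOTS (module constant, shared by both Pythons)
def pvRoots : List (List Char) :=
  ["sewingkit".toList, "sewing".toList, "pickaxe".toList, "shovel".toList,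
   "scythe".toList, "hammer".toList, "chisel".toList, "knife".toList,
   "axe".toList, "awl".toList, "saw".toList, "sew".toList]

-- _normalize_tool_match_text (helper shared by A and B; B keeps it unchanged)
def pvNormalize (value : Option String) : List Char :=
  let text := PySem.Chars.lower (PySem.Chars.strip (value.getD "").toList)
  if text = [] then []
  else if PySem.Chars.isIn [':'] text then (PySem.Chars.splitOn text [':']).getLastD []
  else text

def matches_non_consumable_tool_root_py (value : Option String) : Bool :=
  let text := pvNormalize value
  if text = [] then false
  else pvRoots.any (fun root =>
    text == root || PySem.Chars.startswith text (root ++ ['-'])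
      || PySem.Chars.startswith text (root ++ ['_']))

-- ===== PORT B =====
-- _ROOT_SET = frozenset(NON_CONSUMABLE_TOOL_ROOTS)
def pvRootSet : PySem.Set (List Char) := PySem.Set.ofList pvRoots

-- B's for-ch loop: collect the characters of text until the first '-' or '_'
def pvTokenOf : List Char → List Char
  | [] => []
  | c :: rest => if c == '-' || c == '_' then [] else c :: pvTokenOf rest

def matches_non_consumable_tool_root_py_alt (value : Option String) : Bool :=
  let text := pvNormalize value
  if text = [] then false
  else PySem.Set.contains pvRootSet (pvTokenOf text)

-- ===== PRECONDITION & SPEC =====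
def Spec_matches_non_consumable_tool_root_py (value : Option String) (out : Bool) : Prop := out = matches_non_consumable_tool_root_py_alt value
instance (value : Option String) (out : Bool) : Decidable (Spec_matches_non_consumable_tool_root_py value out) := by unfold Spec_matches_non_consumable_tool_root_py; infer_instance

-- ===== CLAIM (what is proved, stated in full; the proofs are below) =====
def Claim_equal_matches_non_consumable_tool_root_py : Prop := ∀ (value : Option String), Dom_matches_non_consumable_tool_root_py value → Spec_matches_non_consumable_tool_root_py value (matches_non_consumable_tool_root_py value)

-- ===== LEMMAS AND PROOFS =====

-- For a root free of '-' and '_', "text equals the root or extends it by '-'/'_'" is exactly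
-- "the prefix of text before its first separator equals the root".
theorem pv_key_prop (r : List Char) (h1 : '-' ∉ r) (h2 : '_' ∉ r) (t : List Char) :
    (t = r ∨ (r ++ ['-']) <+: t ∨ (r ++ ['_']) <+: t) ↔ pvTokenOf t = r := by
  induction r generalizing t with
  | nil =>
    cases t with
    | nil => simp [pvTokenOf]
    | cons c t' =>
      simp only [pvTokenOf, List.nil_append, List.cons_prefix_cons]
      by_cases hd : c = '-'
      · subst hd; simp
      · by_cases hu : c = '_'
        · subst hu; simp
        · have hd' : ¬('-' = c) := fun h => hd h.symm
          have hu' : ¬('_' = c) := fun h => hu h.symm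
          simp [hd, hu, hd', hu']
  | cons a r' ih =>
    simp only [List.mem_cons, not_or] at h1 h2
    obtain ⟨ha1, hr1⟩ := h1
    obtain ⟨ha2, hr2⟩ := h2
    cases t with
    | nil => simp [pvTokenOf]
    | cons c t' =>
      by_cases hc : c = a
      · subst hc
        have hne1 : c ≠ '-' := fun h => ha1 h.symm
        have hne2 : c ≠ '_' := fun h => ha2 h.symm
        have hif : (c == '-' || c == '_') = false := by simp [hne1, hne2]
        simp only [pvTokenOf, hif, Bool.false_eq_true, if_false, List.cons_append,
          List.cons_prefix_cons, List.cons.injEq, true_and]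
        simpa using ih hr1 hr2 t'
      · have hac : a ≠ c := fun h => hc h.symm
        apply iff_of_false
        · simp [List.cons_prefix_cons, hc, hac]
        · simp only [pvTokenOf]
          split
          · simp
          · simp [hc]

-- the same fact as a Bool equation, in the exact shape of A's per-root test
theorem pv_key (r : List Char) (h1 : '-' ∉ r) (h2 : '_' ∉ r) (t : List Char) :
    (t == r || PySem.Chars.startswith t (r ++ ['-'])
      || PySem.Chars.startswith t (r ++ ['_'])) = (pvTokenOf t == r) := by
  rw [Bool.eq_iff_iff]
  simp only [Bool.or_eq_true, beq_iff_eq, PySem.Chars.startswith_iff, or_assoc]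
  exact pv_key_prop r h1 h2 t

theorem pv_set_eq : pvRootSet = pvRoots := by decide

theorem pv_contains_eq (x : List Char) :
    PySem.Set.contains pvRootSet x = pvRoots.any (fun r => x == r) := by
  rw [pv_set_eq, Bool.eq_iff_iff]
  simp only [PySem.Set.contains, List.contains_iff_mem, List.any_eq_true, beq_iff_eq]
  constructor
  · intro h; exact ⟨x, h, rfl⟩
  · rintro ⟨r, hr, rfl⟩; exact hr

theorem pv_any_eq (t : List Char) :
    pvRoots.any (fun root =>
      t == root || PySem.Chars.startswith t (root ++ ['-'])
        || PySem.Chars.startswith t (root ++ ['_']))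
      = PySem.Set.contains pvRootSet (pvTokenOf t) := by
  rw [pv_contains_eq]
  simp only [pvRoots, List.any_cons, List.any_nil]
  rw [pv_key "sewingkit".toList (by decide) (by decide) t,
      pv_key "sewing".toList (by decide) (by decide) t,
      pv_key "pickaxe".toList (by decide) (by decide) t,
      pv_key "shovel".toList (by decide) (by decide) t,
      pv_key "scythe".toList (by decide) (by decide) t,
      pv_key "hammer".toList (by decide) (by decide) t,
      pv_key "chisel".toList (by decide) (by decide) t,
      pv_key "knife".toList (by decide) (by decide) t,
      pv_key "axe".toList (by decide) (by decide) t,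
      pv_key "awl".toList (by decide) (by decide) t,
      pv_key "saw".toList (by decide) (by decide) t,
      pv_key "sew".toList (by decide) (by decide) t]

-- ===== VERDICT (by name: the statement is the Claim_ definition above) =====
theorem matches_non_consumable_tool_root_py_spec : Claim_equal_matches_non_consumable_tool_root_py := by
  intro value _
  unfold Spec_matches_non_consumable_tool_root_py
  unfold matches_non_consumable_tool_root_py matches_non_consumable_tool_root_py_alt
  by_cases h : pvNormalize value = [] <;> simp [h, pv_any_eq]
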